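/- GENERATED by farm/mkstatement.py from design/units.tsv (unit `DGifGetLine.3`) and the assertions of Gif/Spec/Seg_DGifGetLine.lean — do not edit.
   THE STATEMENT of the proof unit `DGifGetLine.3`: segment 3 of `DGifGetLine` (10 instructions; entries 0x10a2ea;
   exits 0x10a2ea,0x10a28e; ranges 0x10a2ea-0x10a30a)
   takes each of its entry assertions to one of its exit assertions (`Gif.Spec.DGifGetLine.Seg3`), given the contracts of its callees.
   What the names mean: ProgX/Base/Spec/Basic.lean (the shared hypotheses), Gif/Spec/Seg_DGifGetLine.lean (the assertions). The theorem to prove: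
   `theorem DGifGetLine_3_ok : Gif.Spec.DGifGetLine_3.Statement`. -/
import Gif.Code
import Gif.Dec.All
import Gif.Labels
import Gif.Spec.Reader
import Gif.Spec.Seg_DGifGetLine
namespace Gif.Spec.DGifGetLine_3
open X86 X86.User Asan

/-- The statement of unit `DGifGetLine.3`. -/
def Statement : Prop :=
  ∀ (Lay : Layout) (_hLay : Lay.hi = 0x1000000) (μ : Microarch) (_hμ : UserX.MicroOK μ) (u₀ : State)
    (_hcode : HasCodeNat Lay u₀ Gif.L.DGifGetLine.entry Gif.Code.code_DGifGetLine.nat Gif.L.DGifGetLine.size)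
    (_h_DGifGetCodeNext : ∀ (H : Heap) (rest : List Obj) (frames : List (Nat × FrameLayout)) (F : Forest) (R : Rd), Calls Lay μ ProgX.Base.WayInv (ProgX.Base.conv u₀) Gif.L.DGifGetCodeNext.entry (Gif.Spec.DGifGetCodeNext.spec H rest frames F R)),
    Gif.Spec.DGifGetLine.Seg3 Lay μ u₀

end Gif.Spec.DGifGetLine_3
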